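-- pv_equiv track=rewrite | github.com/octatrifan/grammar-pruning | FoodOrderingDataset/scripts/parse_burger_disambiguation.py | split_balanced_parentheses
-- ===== SOURCE A (Python) =====
-- from typing import Optional, List
--
-- def split_balanced_parentheses(data: str) -> List[str]:
--     """
--     Split a string based on balanced parentheses.
--     :param data: A string starting with an open parenthesis '('.
--     :return: A list of substrings split based on top-level balanced parentheses.
--     """
--     if not data:
--         return []
--
--     parts = []
--     current = []
--     balance = 0
--     for char in data:
--         if char == '(':
--             balance += 1
--         elif char == ')':
--             balance -= 1
--
--         current.append(char)
--         if balance == 0: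
--             parts.append(''.join(current))
--             current = []
--     return parts
-- ===== SOURCE B (Python) =====
-- def split_balanced_parentheses(data: str):
--     # Phase 1: cumulative balance of every prefix.
--     run = []
--     bal = 0
--     for ch in data:
--         bal += (ch == '(') - (ch == ')')
--         run.append(bal)
--     # Phase 2: ends of top-level segments are the indices where the balance is 0.
--     zeros = [i for i, b in enumerate(run) if b == 0]
--     # Phase 3: slice between consecutive boundaries; any tail after the last zero is dropped.
--     parts = []
--     prev = 0
--     for i in zeros:
--         parts.append(data[prev:i + 1])
--         prev = i + 1
--     return parts
-- ===== Notes on version B (the rewrite author's own statement) =====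
-- stated objective: alternative
-- what changed: A's single stateful loop (balance + growing current chunk, flushed when balance hits 0) is replaced by three separate phases: build a cumulative-balance prefix table, collect the indices where it is 0, then slice the string between consecutive boundaries.
import Mathlib
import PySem

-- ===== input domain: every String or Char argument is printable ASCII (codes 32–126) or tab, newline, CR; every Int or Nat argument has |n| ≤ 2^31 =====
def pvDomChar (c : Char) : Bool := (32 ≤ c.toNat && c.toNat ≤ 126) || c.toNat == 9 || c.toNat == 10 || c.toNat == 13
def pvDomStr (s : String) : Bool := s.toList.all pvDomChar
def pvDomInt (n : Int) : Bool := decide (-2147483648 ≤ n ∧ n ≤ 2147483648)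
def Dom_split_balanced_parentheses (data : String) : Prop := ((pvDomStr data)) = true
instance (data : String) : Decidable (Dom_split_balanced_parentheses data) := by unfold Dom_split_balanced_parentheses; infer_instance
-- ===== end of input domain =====

-- B replaces A's single stateful loop by three phases: a cumulative-balance prefix table,
-- its zero indices, and slicing between consecutive boundaries (objective: alternative).

-- ===== PORT A =====
def split_balanced_parentheses (data : String) : List String :=
  if data.toList = [] then []
  else
    (data.toList.foldl
      (fun (st : List String × List Char × Int) ch =>
        let balance : Int :=
          if ch = '(' then st.2.2 + 1
          else if ch = ')' then st.2.2 - 1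
          else st.2.2
        let current := st.2.1 ++ [ch]
        if balance = 0 then (st.1 ++ [String.ofList current], ([] : List Char), balance)
        else (st.1, current, balance))
      ([], [], 0)).1

-- ===== PORT B =====
def split_balanced_parentheses_alt (data : String) : List String :=
  let run := (data.toList.foldl
      (fun (st : List Int × Int) ch =>
        let bal := st.2 + (if ch = '(' then (1 : Int) else 0) - (if ch = ')' then (1 : Int) else 0)
        (st.1 ++ [bal], bal)) ([], 0)).1
  let zeros := ((PySem.List.enumerate run 0).filter (fun p => p.2 == 0)).map (·.1)
  (zeros.foldl
      (fun (st : List String × Int) i =>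
        (st.1 ++ [String.ofList (PySem.List.slice data.toList (some st.2) (some (i + 1)))], i + 1))
      ([], 0)).1

-- ===== PRECONDITION & SPEC =====
def Spec_split_balanced_parentheses (data : String) (out : List String) : Prop := out = split_balanced_parentheses_alt data
instance (data : String) (out : List String) : Decidable (Spec_split_balanced_parentheses data out) := by unfold Spec_split_balanced_parentheses; infer_instance

-- ===== CLAIM (what is proved, stated in full; the proofs are below) =====
def Claim_equal_split_balanced_parentheses : Prop := ∀ (data : String), Dom_split_balanced_parentheses data → Spec_split_balanced_parentheses data (split_balanced_parentheses data)

-- ===== LEMMAS AND PROOFS =====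

def pvDelta (c : Char) : Int := if c = '(' then 1 else if c = ')' then -1 else 0

/-- Common characterisation: the chunks produced from pending chars `cur` at balance `b`. -/
def pvChunks : Int → List Char → List Char → List String
  | _, _, [] => []
  | b, cur, c :: cs =>
    if b + pvDelta c = 0 then String.ofList (cur ++ [c]) :: pvChunks 0 [] cs
    else pvChunks (b + pvDelta c) (cur ++ [c]) cs

/-- Cumulative balances starting from `b`. -/
def pvScan : Int → List Char → List Int
  | _, [] => []
  | b, c :: cs => (b + pvDelta c) :: pvScan (b + pvDelta c) cs

theorem pvA_step (b : Int) (c : Char) :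
    (if c = '(' then b + 1 else if c = ')' then b - 1 else b) = b + pvDelta c := by
  unfold pvDelta; split_ifs <;> omega

theorem pvB_step (b : Int) (c : Char) :
    b + (if c = '(' then (1 : Int) else 0) - (if c = ')' then (1 : Int) else 0) = b + pvDelta c := by
  unfold pvDelta; split_ifs <;> first | omega | simp_all

/-- A's loop equals the chunk characterisation. -/
theorem pvA_fold (cs : List Char) :
    ∀ (parts : List String) (cur : List Char) (b : Int),
    (cs.foldl
      (fun (st : List String × List Char × Int) ch =>
        let balance : Int :=
          if ch = '(' then st.2.2 + 1
          else if ch = ')' then st.2.2 - 1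
          else st.2.2
        let current := st.2.1 ++ [ch]
        if balance = 0 then (st.1 ++ [String.ofList current], ([] : List Char), balance)
        else (st.1, current, balance))
      (parts, cur, b)).1 = parts ++ pvChunks b cur cs := by
  induction cs with
  | nil => intro parts cur b; simp [pvChunks]
  | cons c cs ih =>
    intro parts cur b
    simp only [List.foldl_cons, pvA_step b c, pvChunks]
    by_cases h : b + pvDelta c = 0
    · simp only [h, ih]; simp
    · simp only [if_neg h, ih]

/-- Final balance of B's first loop. -/
def pvLastBal : Int → List Char → Int
  | b, [] => b
  | b, c :: cs => pvLastBal (b + pvDelta c) cs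

/-- B's first loop builds the prefix-balance table. -/
theorem pvB_run (cs : List Char) :
    ∀ (acc : List Int) (b : Int),
    cs.foldl
      (fun (st : List Int × Int) ch =>
        let bal := st.2 + (if ch = '(' then (1 : Int) else 0) - (if ch = ')' then (1 : Int) else 0)
        (st.1 ++ [bal], bal)) (acc, b)
      = (acc ++ pvScan b cs, pvLastBal b cs) := by
  induction cs with
  | nil => intro acc b; simp [pvScan, pvLastBal]
  | cons c cs ih =>
    intro acc b
    simp only [List.foldl_cons, pvB_step b c, pvScan, pvLastBal, ih]
    simp

/-- B's slicing loop over the zero indices equals the chunk characterisation. -/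
theorem pvB_slices (full : List Char) (cs : List Char) :
    ∀ (b : Int) (cur : List Char) (prev : Nat) (out : List String),
    full.drop prev = cur ++ cs →
    ((((PySem.List.enumerate (pvScan b cs) ((prev + cur.length : Nat) : Int)).filter
        (fun p => p.2 == 0)).map (·.1)).foldl
      (fun (st : List String × Int) i =>
        (st.1 ++ [String.ofList (PySem.List.slice full (some st.2) (some (i + 1)))], i + 1))
      (out, (prev : Int))).1 = out ++ pvChunks b cur cs := by
  induction cs with
  | nil => intro b cur prev out _; simp [pvScan, pvChunks]
  | cons c cs ih =>
    intro b cur prev out hdrop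
    simp only [pvScan, pvChunks, PySem.List.enumerate_cons, List.filter_cons]
    by_cases h : b + pvDelta c = 0
    · have hz : ((b + pvDelta c) == 0) = true := by simpa using h
      simp only [h, if_pos, beq_self_eq_true, List.map_cons, List.foldl_cons]
      have hslice : PySem.List.slice full (some (prev : Int))
          (some (((prev + cur.length : Nat) : Int) + 1)) = cur ++ [c] := by
        have : (((prev + cur.length : Nat) : Int) + 1) = ((prev + cur.length + 1 : Nat) : Int) := by
          push_cast; ring
        rw [this, PySem.List.slice_natCast]
        have h1 : prev + cur.length + 1 - prev = cur.length + 1 := by omega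
        rw [h1, hdrop]
        simp [List.take_append]
      have hdrop' : full.drop (prev + cur.length + 1) = cs := by
        have h2 : (cur ++ c :: cs).drop (cur.length + 1) = cs := by simp [List.drop_append]
        rw [show prev + cur.length + 1 = prev + (cur.length + 1) by omega, ← List.drop_drop, hdrop, h2]
      have hcast : (((prev + cur.length : Nat) : Int) + 1) = (((prev + cur.length + 1 : Nat)) : Int) := by
        push_cast; ring
      rw [hslice, hcast]
      have := ih 0 [] (prev + cur.length + 1) (out ++ [String.ofList (cur ++ [c])]) (by simpa using hdrop')
      simpa using this
    · have hz : ((b + pvDelta c) == 0) = false := by simpa using h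
      simp only [h, hz, if_false, Bool.false_eq_true]
      have hstart : (((prev + cur.length : Nat) : Int) + 1) = ((prev + (cur ++ [c]).length : Nat) : Int) := by
        simp; push_cast; ring
      rw [hstart]
      exact ih (b + pvDelta c) (cur ++ [c]) prev out (by simpa using hdrop)

-- ===== VERDICT (by name: the statement is the Claim_ definition above) =====
theorem split_balanced_parentheses_spec : Claim_equal_split_balanced_parentheses := by
  intro data _
  unfold Spec_split_balanced_parentheses split_balanced_parentheses split_balanced_parentheses_alt
  rw [pvB_run]
  have hb := pvB_slices data.toList data.toList 0 [] 0 [] (by simp)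
  simp only [List.length_nil, Nat.add_zero, Nat.cast_zero, List.nil_append] at hb
  by_cases hnil : data.toList = []
  · simp [hnil, pvScan]
  · rw [if_neg hnil, pvA_fold]
    simpa using hb.symm
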